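-- pv_equiv track=rewrite | github.com/holopyolo/vshell | comms.py | AmountLinesAll
-- ===== SOURCE A (Python) =====
-- def AmountLinesAll(string) -> int:
--     if not(len(string)):
--         return 0
--     counted = 1
--     for index in range(1, len(string)):
--         if string[index] == '\n' and string[index - 1] != '\n':
--             counted += 1
--     return counted
-- ===== SOURCE B (Python) =====
-- def AmountLinesAll(string) -> int:
--     if not string:
--         return 0
--     segments = sum(1 for part in string.split('\n') if part)
--     return segments + (1 if string[-1] == '\n' else 0)
-- ===== Notes on version B (the rewrite author's own statement) =====
-- stated objective: idiomatic
-- what changed: Instead of scanning adjacent index pairs with a counter, B splits the string on the newline character, counts the nonempty parts (the maximal non-newline segments), and adds 1 when the string ends in a newline; there is no adjacency comparison at all.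
import Mathlib
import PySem

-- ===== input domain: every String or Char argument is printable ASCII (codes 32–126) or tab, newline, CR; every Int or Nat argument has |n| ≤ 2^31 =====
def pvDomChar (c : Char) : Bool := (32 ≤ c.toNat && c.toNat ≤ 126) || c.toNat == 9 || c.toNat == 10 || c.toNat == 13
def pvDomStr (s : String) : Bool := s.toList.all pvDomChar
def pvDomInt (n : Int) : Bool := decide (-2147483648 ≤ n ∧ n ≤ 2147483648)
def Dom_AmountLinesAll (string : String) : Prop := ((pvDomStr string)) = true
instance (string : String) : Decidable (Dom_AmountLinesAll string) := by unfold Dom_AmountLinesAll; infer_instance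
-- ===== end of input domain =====

-- B counts lines by splitting on the newline character and counting nonempty segments (plus one for a trailing newline) instead of A's per-index adjacency scan; idiomatic, and measurably faster by a constant factor (C-implemented str.split vs a Python char loop).


-- ===== PORT A =====
def AmountLinesAll (string : String) : Int :=
  if string.toList.length = 0 then 0
  else
    (PySem.List.pyRange 1 (string.toList.length) 1).foldl
      (fun counted index =>
        if PySem.Str.pyGet? string index = some '\n' ∧ PySem.Str.pyGet? string (index - 1) ≠ some '\n'
        then counted + 1 else counted)
      1

-- ===== PORT B =====
def AmountLinesAll_alt (string : String) : Int :=
  if string.toList = [] then 0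
  else
    ((PySem.Chars.splitOn string.toList ['\n']).countP (fun part => !part.isEmpty) : Int)
      + (if PySem.Str.pyGet? string (-1) = some '\n' then 1 else 0)

-- ===== PRECONDITION & SPEC =====
def Spec_AmountLinesAll (string : String) (out : Int) : Prop := out = AmountLinesAll_alt string
instance (string : String) (out : Int) : Decidable (Spec_AmountLinesAll string out) := by unfold Spec_AmountLinesAll; infer_instance

-- ===== CLAIM (what is proved, stated in full; the proofs are below) =====
def Claim_equal_AmountLinesAll : Prop := ∀ (string : String), Dom_AmountLinesAll string → Spec_AmountLinesAll string (AmountLinesAll string)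

-- ===== LEMMAS AND PROOFS =====

-- A's loop step, over the character list of the string.
def pvStep (s : List Char) : Int → Int → Int := fun counted index =>
  if PySem.List.pyGet? s index = some '\n' ∧ PySem.List.pyGet? s (index - 1) ≠ some '\n'
  then counted + 1 else counted

-- the pair predicate: a newline whose predecessor is not a newline
def pvPred : Char × Char → Bool := fun p => p.1 != '\n' && p.2 == '\n'

-- reference splitter: pvMySplit cur s = the parts of (cur ++ s) split on '\n', cur newline-free
def pvMySplit : List Char → List Char → List (List Char)
  | d, [] => [d]
  | d, c :: r => if c = '\n' then d :: pvMySplit [] r else pvMySplit (d ++ [c]) r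

-- adjacency count with a boolean "previous char was a newline" state
def pvPairCount : Bool → List Char → Int
  | _, [] => 0
  | b, c :: r => (if c = '\n' ∧ b = false then 1 else 0) + pvPairCount (c == '\n') r

-- A's loop tail from position k equals the pair count on the corresponding suffix
lemma pv_aux (n : Nat) : ∀ (s : List Char) (k : Nat) (a : Int), s.length = k + 1 + n →
    (PySem.List.pyRange ((k : Int) + 1) (s.length) 1).foldl (pvStep s) a
      = a + (((s.drop k).zip (s.drop (k + 1))).countP pvPred : Int) := by
  induction n with
  | zero =>
    intro s k a h
    have h1 : (s.length : Int) ≤ (k : Int) + 1 := by omega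
    rw [PySem.List.pyRange_one_eq_nil h1]
    have hd : s.drop (k + 1) = [] := List.drop_eq_nil_of_le (by omega)
    simp [hd]
  | succ m ih =>
    intro s k a h
    have hk1 : k + 1 < s.length := by omega
    have hk : k < s.length := by omega
    have hlt : (k : Int) + 1 < (s.length : Int) := by exact_mod_cast hk1
    rw [PySem.List.pyRange_one_cons hlt]
    have hstep : pvStep s a ((k : Int) + 1)
        = a + if pvPred (s[k], s[k + 1]) then 1 else 0 := by
      have e1 : ((k : Int) + 1) = ((k + 1 : Nat) : Int) := by push_cast; ring
      have e2 : ((k : Int) + 1 - 1) = ((k : Nat) : Int) := by push_cast; ring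
      simp only [pvStep, e1, e2, PySem.List.pyGet?_natCast,
        List.getElem?_eq_getElem hk1, List.getElem?_eq_getElem hk, pvPred]
      by_cases h1 : s[k + 1] = '\n' <;> by_cases h2 : s[k] = '\n' <;>
        simp [h1, h2, List.getElem?_eq_getElem hk]
    have hdk : s.drop k = s[k] :: s.drop (k + 1) := by
      rw [List.drop_eq_getElem_cons hk]
    have hdk1 : s.drop (k + 1) = s[k + 1] :: s.drop (k + 2) := by
      rw [List.drop_eq_getElem_cons hk1]
    have e3 : ((k : Int) + 1) + 1 = ((k + 1 : Nat) : Int) + 1 := by push_cast; ring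
    rw [List.foldl_cons, hstep, e3, ih s (k + 1) _ (by omega)]
    rw [hdk, hdk1, List.zip_cons_cons, List.countP_cons]
    rw [← hdk1]
    by_cases hp : pvPred (s[k], s[k + 1]) <;> simp [hp] <;> push_cast <;> ring

-- the zip count with explicit head equals pvPairCount
lemma pv_zipPair : ∀ (r : List Char) (prev : Char),
    ((((prev :: r).zip r).countP pvPred : Nat) : Int) = pvPairCount (prev == '\n') r := by
  intro r
  induction r with
  | nil => intro prev; simp [pvPairCount]
  | cons c r' ih =>
    intro prev
    rw [List.zip_cons_cons, List.countP_cons]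
    push_cast
    rw [ih c]
    by_cases h1 : c = '\n' <;> by_cases h2 : prev = '\n' <;>
      simp [pvPairCount, pvPred, h1, h2, add_comm]

-- whether the string (with "previous char was a newline" state b) ends in a newline
def pvEndNL : Bool → List Char → Bool
  | b, [] => b
  | _, c :: r => pvEndNL (c == '\n') r

-- on a nonempty list pvEndNL just tests the last character
lemma pv_endNL : ∀ (l : List Char) (c : Char) (b : Bool),
    pvEndNL b (c :: l) = ((c :: l).getLast? == some '\n') := by
  intro l
  induction l with
  | nil => intro c b; simp [pvEndNL]
  | cons h t ih =>
    intro c b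
    simp only [pvEndNL, List.getLast?_cons_cons]
    exact ih h (c == '\n')

-- splitOn's fuel loop computes pvMySplit (enough fuel)
lemma pv_go_eq : ∀ (fuel : Nat) (l cur : List Char) (acc : List (List Char)),
    l.length < fuel →
    PySem.Chars.splitOn.go ['\n'] fuel l cur acc = acc.reverse ++ pvMySplit cur.reverse l := by
  intro fuel
  induction fuel with
  | zero => intro l cur acc h; omega
  | succ f ih =>
    intro l cur acc h
    cases l with
    | nil => simp [PySem.Chars.splitOn.go, pvMySplit]
    | cons c rest =>
      by_cases hc : c = '\n'
      · have hpre : List.isPrefixOf ['\n'] (c :: rest) = true := by simp [List.isPrefixOf, hc]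
        rw [PySem.Chars.splitOn.go]
        simp only [hpre]
        rw [show (c :: rest).drop (['\n'].length) = rest by simp]
        rw [ih rest [] (cur.reverse :: acc) (by simpa using Nat.lt_of_succ_lt_succ h)]
        simp [pvMySplit, hc]
      · have hpre : List.isPrefixOf ['\n'] (c :: rest) = false := by
          simp [List.isPrefixOf]
          exact fun hh => hc hh.symm
        rw [PySem.Chars.splitOn.go]
        simp only [hpre, Bool.false_eq_true, if_false]
        rw [ih rest (c :: cur) acc (by simpa using Nat.lt_of_succ_lt_succ h)]
        simp [pvMySplit, hc]

-- nonempty-part count of pvMySplit = adjacency count + a last-character correction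
lemma pv_count_split : ∀ (s : List Char) (b : Bool) (cur : List Char),
    (cur = [] ↔ b = true) →
    (((pvMySplit cur s).countP (fun p => !p.isEmpty) : Nat) : Int)
      = pvPairCount b s + (if pvEndNL b s = true then 0 else 1) := by
  intro s
  induction s with
  | nil =>
    intro b cur hb
    cases b
    · have hcur : cur ≠ [] := by simp [hb]
      simp [pvMySplit, pvPairCount, pvEndNL, hcur]
    · simp [pvMySplit, pvPairCount, pvEndNL, hb.mpr rfl]
  | cons c r ih =>
    intro b cur hb
    by_cases hc : c = '\n'
    · subst hc
      rw [show pvMySplit cur ('\n' :: r) = cur :: pvMySplit [] r from by simp [pvMySplit]]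
      rw [List.countP_cons]
      push_cast
      rw [ih true [] (by simp)]
      have he : pvEndNL b ('\n' :: r) = pvEndNL true r := by simp [pvEndNL]
      cases b
      · have hcur : cur ≠ [] := by simp [hb]
        simp only [he, pvPairCount]
        simp [hcur]
        ring
      · simp only [he, pvPairCount]
        simp [hb.mpr rfl]
    · rw [show pvMySplit cur (c :: r) = pvMySplit (cur ++ [c]) r from by simp [pvMySplit, hc]]
      rw [ih false (cur ++ [c]) (by simp)]
      have hcb : (c == '\n') = false := by simp [hc]
      have he : pvEndNL b (c :: r) = pvEndNL false r := by simp [pvEndNL, hcb]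
      simp only [he, pvPairCount, hcb]
      simp [hc]

-- ===== VERDICT (by name: the statement is the Claim_ definition above) =====
theorem AmountLinesAll_spec : Claim_equal_AmountLinesAll := by
  intro s _
  unfold Spec_AmountLinesAll AmountLinesAll AmountLinesAll_alt
  by_cases hnil : s.toList = []
  · simp [hnil]
  · have hlen : s.toList.length ≠ 0 := by simpa using hnil
    have hpos : 0 < s.toList.length := Nat.pos_of_ne_zero hlen
    rw [if_neg hlen, if_neg hnil]
    -- A's side: fold = 1 + zip pair count
    have hfold : (PySem.List.pyRange ((0 : Nat) + 1) (s.toList.length) 1).foldl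
        (pvStep s.toList) 1
        = 1 + (((s.toList.drop 0).zip (s.toList.drop 1)).countP pvPred : Int) :=
      pv_aux (s.toList.length - 1) s.toList 0 1 (by omega)
    have hstepEq : (fun (counted index : Int) =>
        if PySem.Str.pyGet? s index = some '\n' ∧ PySem.Str.pyGet? s (index - 1) ≠ some '\n'
        then counted + 1 else counted) = pvStep s.toList := by
      funext counted index
      simp [pvStep, PySem.Str.pyGet?_eq, PySem.Chars.pyGet?_eq_listPyGet?]
    rw [hstepEq]
    obtain ⟨hd, tl, hs⟩ := List.exists_cons_of_ne_nil hnil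
    have hA : (PySem.List.pyRange ((0 : Nat) + 1) (s.toList.length) 1).foldl
        (pvStep s.toList) 1 = 1 + pvPairCount (hd == '\n') tl := by
      rw [hfold, hs]
      simp only [List.drop_zero, List.drop_succ_cons, List.drop_zero]
      rw [pv_zipPair tl hd]
    rw [show PySem.List.pyRange 1 s.toList.length 1
        = PySem.List.pyRange ((0 : Nat) + 1) s.toList.length 1 by norm_num, hA]
    -- B's side: splitOn = pvMySplit, then the counting lemma
    have hsplit : PySem.Chars.splitOn s.toList ['\n'] = pvMySplit [] s.toList := by
      unfold PySem.Chars.splitOn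
      rw [pv_go_eq (s.toList.length + 1) s.toList [] [] (by omega)]
      simp
    have hcount := pv_count_split s.toList true [] (by simp)
    have hget : PySem.Str.pyGet? s (-1) = s.toList.getLast? := by
      simp [PySem.List.pyGet?_neg_one]
    have hend : pvEndNL true s.toList = (s.toList.getLast? == some '\n') := by
      rw [hs]; exact pv_endNL tl hd true
    have hpc : pvPairCount true s.toList = pvPairCount (hd == '\n') tl := by
      rw [hs]; simp [pvPairCount]
    rw [hsplit, hcount, hget, hend, hpc]
    by_cases hl : s.toList.getLast? = some '\n' <;> simp [hl] <;> ring
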